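-- pv_equiv track=rewrite | github.com/MIT-Emerging-Talent/ET6-practice-code-review | solutions/who_likes_it.py | who_likes_it
-- ===== SOURCE A (Python) =====
-- from typing import List
--
-- def who_likes_it(names: List[str]) -> str:
--     """
--     Generate a like display message based on the input list of names.
--
--     Args:
--         names (List[str]): A list of names representing people who liked an item (post)
--
--     Returns:
--         str: A display message that describes how many people liked the post
--
--     Raises:
--         - ValueError: If any name in the list is not a string
--         - The list itself is not of type `List`
--
--     Examples:
--         >>> who_likes_it([])
--         'no one likes this'
--         >>> who_likes_it(["Evan"])
--         'Evan likes this'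
--         >>> who_likes_it(["Evan", "Madiha"])
--         'Evan and Madiha like this'
--         >>> who_likes_it(["Evan", "Madiha", "Megan"])
--         'Evan, Madiha and Megan like this'
--         >>> who_likes_it(["Evan", "Madiha", "Megan", "Camila"])
--         'Evan, Madiha and 2 others like this'
--     """
--
--     # Defensive assertions
--     assert isinstance(names, List), "Input names should be of type List"
--     assert all(isinstance(name, str) for name in names), "All names should be of type string"
--
--     names_length = len(names)
--
--     # If the list is empty, return 'no one likes this'.
--     if names_length == 0:
--         return "no one likes this"
--
--     # If the list has 1 to 3 names, format them directly in the message.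
--     elif names_length == 1:
--         return f"{names[0]} likes this"
--
--     elif names_length == 2:
--         return f"{names[0]} and {names[1]} like this"
--
--     elif names_length == 3:
--         return f"{names[0]}, {names[1]} and {names[2]} like this"
--
--     # For 4 or more names, summarize additional names as 'X others'.
--     else:
--         return f"{names[0]}, {names[1]} and {names_length - 2} others like this"
-- ===== SOURCE B (Python) =====
-- from typing import List
--
--
-- def who_likes_it(names: List[str]) -> str:
--     # Defensive assertions (kept from the original contract)
--     assert isinstance(names, List), "Input names should be of type List"
--     assert all(isinstance(name, str) for name in names), "All names should be of type string"
--
--     if not names: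
--         return "no one likes this"
--
--     # Build the displayed subject tokens: up to three names, or two names
--     # plus an "N others" summary token.
--     if len(names) <= 3:
--         shown = names[:3]
--     else:
--         shown = names[:2] + [f"{len(names) - 2} others"]
--
--     # Join the tokens grammatically: commas between all but the last pair,
--     # " and " before the last token.
--     if len(shown) == 1:
--         subject = shown[0]
--     else:
--         subject = ", ".join(shown[:-1]) + " and " + shown[-1]
--
--     verb = "likes" if len(names) == 1 else "like"
--     return f"{subject} {verb} this"
-- ===== Notes on version B (the rewrite author's own statement) =====
-- stated objective: alternative
-- what changed: Instead of five hard-coded full messages, B composes the message from parts: it builds a token list (up to three names, or two names plus an 'N others' summary), joins the tokens grammatically with ', ' and ' and ', and appends a verb chosen by plurality.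
import Mathlib
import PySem

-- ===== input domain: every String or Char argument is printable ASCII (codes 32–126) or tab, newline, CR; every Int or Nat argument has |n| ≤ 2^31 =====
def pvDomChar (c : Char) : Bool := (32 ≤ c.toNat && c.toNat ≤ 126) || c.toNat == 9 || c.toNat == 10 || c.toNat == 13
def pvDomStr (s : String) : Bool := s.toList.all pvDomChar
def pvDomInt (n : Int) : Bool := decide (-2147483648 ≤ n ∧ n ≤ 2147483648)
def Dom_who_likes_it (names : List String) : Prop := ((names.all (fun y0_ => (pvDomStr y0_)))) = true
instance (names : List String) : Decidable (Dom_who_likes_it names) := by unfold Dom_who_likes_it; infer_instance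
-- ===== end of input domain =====

-- B composes the message from parts (token list, grammatical join, plurality verb)
-- instead of A's five hard-coded full messages (objective: alternative; same cost).


-- ===== PORT A =====
-- Literal port of A's if/elif chain; f-strings are string concatenation.
-- names[i] is only reached when the branch guarantees i < len(names), so List.getD is exact there.
def who_likes_it (names : List String) : String :=
  let names_length := names.length
  if names_length = 0 then
    "no one likes this"
  else if names_length = 1 then
    names.getD 0 "" ++ " likes this"
  else if names_length = 2 then
    names.getD 0 "" ++ " and " ++ names.getD 1 "" ++ " like this"
  else if names_length = 3 then
    names.getD 0 "" ++ ", " ++ names.getD 1 "" ++ " and " ++ names.getD 2 "" ++ " like this"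
  else
    names.getD 0 "" ++ ", " ++ names.getD 1 "" ++ " and " ++
      PySem.Int.toStr ((names_length : Int) - 2) ++ " others like this"

-- ===== PORT B =====
-- names[:k] is List.take; shown[:-1] = take (len-1); shown[-1] = getD (len-1)
-- (shown is nonempty in that branch); ", ".join → PySem.Str.join.
def who_likes_it_alt (names : List String) : String :=
  if names = [] then "no one likes this"
  else
    let shown : List String :=
      if names.length ≤ 3 then names.take 3
      else names.take 2 ++ [PySem.Int.toStr ((names.length : Int) - 2) ++ " others"]
    let subject : String :=
      if shown.length = 1 then shown.getD 0 ""
      else PySem.Str.join ", " (shown.take (shown.length - 1)) ++ " and " ++ shown.getD (shown.length - 1) ""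
    let verb : String := if names.length = 1 then "likes" else "like"
    subject ++ " " ++ verb ++ " this"

-- ===== PRECONDITION & SPEC =====
def Spec_who_likes_it (names : List String) (out : String) : Prop := out = who_likes_it_alt names
instance (names : List String) (out : String) : Decidable (Spec_who_likes_it names out) := by unfold Spec_who_likes_it; infer_instance

-- ===== CLAIM (what is proved, stated in full; the proofs are below) =====
def Claim_equal_who_likes_it : Prop := ∀ (names : List String), Dom_who_likes_it names → Spec_who_likes_it names (who_likes_it names)

-- ===== LEMMAS AND PROOFS =====

-- ===== VERDICT (by name: the statement is the Claim_ definition above) =====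
theorem who_likes_it_spec : Claim_equal_who_likes_it := by
  intro names _
  show who_likes_it names = who_likes_it_alt names
  apply String.toList_inj.mp
  match names with
  | [] => rfl
  | [a] =>
      simp [who_likes_it, who_likes_it_alt]
  | [a, b] =>
      simp [who_likes_it, who_likes_it_alt, PySem.Str.toList_join,
        PySem.Chars.join_singleton]
  | [a, b, c] =>
      simp [who_likes_it, who_likes_it_alt, PySem.Str.toList_join,
        PySem.Chars.join_cons_cons, PySem.Chars.join_singleton]
  | a :: b :: c :: d :: rest =>
      have h3 : ¬ (rest.length + 1 + 1 + 1 < 3) := by omega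
      simp [who_likes_it, who_likes_it_alt, h3, PySem.Str.toList_join,
        PySem.Chars.join_cons_cons, PySem.Chars.join_singleton, List.take]
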